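-- pv_equiv track=rewrite | github.com/dnxie12/hanzireader | build/build_data.py | tone_number_to_mark
-- ===== SOURCE A (Python) =====
-- TONE_MARKS = {
--     "a": ["ā", "á", "ǎ", "à", "a"],
--     "e": ["ē", "é", "ě", "è", "e"],
--     "i": ["ī", "í", "ǐ", "ì", "i"],
--     "o": ["ō", "ó", "ǒ", "ò", "o"],
--     "u": ["ū", "ú", "ǔ", "ù", "u"],
--     "v": ["ǖ", "ǘ", "ǚ", "ǜ", "ü"],  # ü
-- }
--
-- def tone_number_to_mark(syllable):
--     """Convert pinyin with tone number (e.g., 'ma1') to tone mark (e.g., 'mā')."""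
--     syllable = syllable.strip().lower()
--     if not syllable:
--         return syllable
--
--     # Extract tone number
--     if syllable[-1].isdigit():
--         tone = int(syllable[-1])
--         syllable = syllable[:-1]
--     else:
--         tone = 5  # neutral
--
--     if tone == 5 or tone == 0:
--         return syllable.replace("v", "ü").replace("u:", "ü")
--
--     tone_idx = tone - 1  # 0-indexed
--
--     # Replace u: or v with ü marker
--     syllable = syllable.replace("u:", "v")
--
--     # Tone mark placement rules:
--     # 1. If there's an 'a' or 'e', it takes the mark
--     # 2. If there's 'ou', 'o' takes the mark
--     # 3. Otherwise, the second vowel takes the mark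
--     for vowel in ["a", "e"]:
--         if vowel in syllable:
--             return syllable.replace(vowel, TONE_MARKS[vowel][tone_idx], 1)
--
--     if "ou" in syllable:
--         return syllable.replace("o", TONE_MARKS["o"][tone_idx], 1)
--
--     # Find the last vowel
--     for i in range(len(syllable) - 1, -1, -1):
--         if syllable[i] in TONE_MARKS:
--             return syllable[:i] + TONE_MARKS[syllable[i]][tone_idx] + syllable[i + 1 :]
--
--     return syllable.replace("v", "ü")
-- ===== SOURCE B (Python) =====
-- TONE_MARKS = {
--     "a": ["ā", "á", "ǎ", "à", "a"],
--     "e": ["ē", "é", "ě", "è", "e"],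
--     "i": ["ī", "í", "ǐ", "ì", "i"],
--     "o": ["ō", "ó", "ǒ", "ò", "o"],
--     "u": ["ū", "ú", "ǔ", "ù", "u"],
--     "v": ["ǖ", "ǘ", "ǚ", "ǜ", "ü"],  # ü
-- }
--
-- def tone_number_to_mark(syllable):
--     """Convert pinyin with tone number (e.g., 'ma1') to tone mark (e.g., 'mā')."""
--     syllable = syllable.strip().lower()
--     if not syllable:
--         return syllable
--
--     if syllable[-1].isdigit():
--         tone = int(syllable[-1])
--         syllable = syllable[:-1]
--     else:
--         tone = 5  # neutral
--
--     if tone == 5 or tone == 0: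
--         return syllable.replace("v", "ü").replace("u:", "ü")
--
--     syllable = syllable.replace("u:", "v")
--
--     # One forward state-machine pass finds the mark position directly.
--     first_a = first_e = first_o = last_vowel = None
--     has_ou = False
--     prev = None
--     for i, ch in enumerate(syllable):
--         if ch == 'a' and first_a is None:
--             first_a = i
--         if ch == 'e' and first_e is None:
--             first_e = i
--         if ch == 'o' and first_o is None:
--             first_o = i
--         if prev == 'o' and ch == 'u':
--             has_ou = True
--         if ch in "aeiouv":
--             last_vowel = i
--         prev = ch
--
--     if first_a is not None:
--         idx = first_a
--     elif first_e is not None: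
--         idx = first_e
--     elif has_ou:
--         idx = first_o
--     else:
--         idx = last_vowel
--
--     if idx is None:
--         return syllable.replace("v", "ü")
--     return syllable[:idx] + TONE_MARKS[syllable[idx]][tone - 1] + syllable[idx + 1:]
-- ===== Notes on version B (the rewrite author's own statement) =====
-- stated objective: alternative
-- what changed: A's cascade of early-returning replace() branches and a backward index loop is replaced by a single forward state-machine pass (tracking first 'a'/'e'/'o', an 'ou' digram flag via the previous character, and the last vowel) that computes the mark position once, followed by one splice.
import Mathlib
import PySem

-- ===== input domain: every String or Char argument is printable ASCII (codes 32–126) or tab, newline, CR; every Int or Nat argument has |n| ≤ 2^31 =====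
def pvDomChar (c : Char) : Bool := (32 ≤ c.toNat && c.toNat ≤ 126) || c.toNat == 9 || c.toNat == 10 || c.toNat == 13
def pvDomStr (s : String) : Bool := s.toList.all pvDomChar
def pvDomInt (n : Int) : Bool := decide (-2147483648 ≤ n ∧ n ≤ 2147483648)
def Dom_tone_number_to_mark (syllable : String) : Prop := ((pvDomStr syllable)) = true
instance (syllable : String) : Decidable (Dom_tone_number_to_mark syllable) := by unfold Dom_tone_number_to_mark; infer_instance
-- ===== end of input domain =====

-- B replaces A's branch-and-replace cascade by a single forward state-machine pass that
-- finds the mark position directly, then one splice (objective: alternative decomposition).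

-- shared module constant TONE_MARKS, as the lookup function and its key list
def pvToneMarks (c : Char) : List (List Char) :=
  if c = 'a' then [['ā'], ['á'], ['ǎ'], ['à'], ['a']]
  else if c = 'e' then [['ē'], ['é'], ['ě'], ['è'], ['e']]
  else if c = 'i' then [['ī'], ['í'], ['ǐ'], ['ì'], ['i']]
  else if c = 'o' then [['ō'], ['ó'], ['ǒ'], ['ò'], ['o']]
  else if c = 'u' then [['ū'], ['ú'], ['ǔ'], ['ù'], ['u']]
  else if c = 'v' then [['ǖ'], ['ǘ'], ['ǚ'], ['ǜ'], ['ü']]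
  else []

def pvToneKeys : List Char := ['a', 'e', 'i', 'o', 'u', 'v']

-- ===== PORT A =====

-- s.replace(old, new, 1) for a single-character `old`: exact (first occurrence only)
def pvReplace1 (cs : List Char) (old : Char) (new : List Char) : List Char :=
  match cs with
  | [] => []
  | c :: rest => if c = old then new ++ rest else c :: pvReplace1 rest old new

-- A's final loop `for i in range(len(s)-1, -1, -1): if s[i] in TONE_MARKS: …`,
-- returning the index it would return at (fuel = i+1; getD is exact since i < len)
def pvDownScan (cs : List Char) : Nat → Option Nat
  | 0 => none
  | i + 1 => if cs.getD i ' ' ∈ pvToneKeys then some i else pvDownScan cs i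

-- the body of A after the neutral-tone early return
def pvAcore (cs0 : List Char) (tone : Int) : List Char :=
  let cs := PySem.Chars.replace cs0 ['u', ':'] ['v']
  -- `for vowel in ["a", "e"]` with early return, unrolled
  if PySem.Chars.isIn ['a'] cs then
    match PySem.List.pyGet? (pvToneMarks 'a') (tone - 1) with
    | some m => pvReplace1 cs 'a' m
    | none => cs  -- Python raises IndexError here (tone 6–9); outside Pre_
  else if PySem.Chars.isIn ['e'] cs then
    match PySem.List.pyGet? (pvToneMarks 'e') (tone - 1) with
    | some m => pvReplace1 cs 'e' m
    | none => cs  -- IndexError; outside Pre_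
  else if PySem.Chars.isIn ['o', 'u'] cs then
    match PySem.List.pyGet? (pvToneMarks 'o') (tone - 1) with
    | some m => pvReplace1 cs 'o' m
    | none => cs  -- IndexError; outside Pre_
  else
    match pvDownScan cs cs.length with
    | some i =>
      match PySem.List.pyGet? (pvToneMarks (cs.getD i ' ')) (tone - 1) with
      | some m =>
        PySem.List.slice cs none (some (i : Int)) ++ m ++
          PySem.List.slice cs (some ((i : Int) + 1)) none
      | none => cs  -- IndexError; outside Pre_
    | none => PySem.Chars.replace cs ['v'] ['ü']

def tone_number_to_mark (syllable : String) : String :=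
  let cs := PySem.Chars.lower (PySem.Chars.strip syllable.toList)
  if cs = [] then String.ofList cs
  else
    match PySem.List.pyGet? cs (-1) with
    | none => String.ofList cs  -- unreachable: cs ≠ []
    | some c =>
      if PySem.Chars.strIsdigit [c] then
        let tone := (PySem.Int.ofChars? [c]).getD 0  -- some: [c] is a digit
        let ds := PySem.List.slice cs none (some (-1))
        if tone = 5 ∨ tone = 0 then
          String.ofList (PySem.Chars.replace (PySem.Chars.replace ds ['v'] ['ü']) ['u', ':'] ['ü'])
        else String.ofList (pvAcore ds tone)
      else  -- tone = 5 (neutral)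
        String.ofList (PySem.Chars.replace (PySem.Chars.replace cs ['v'] ['ü']) ['u', ':'] ['ü'])

-- ===== PORT B =====

structure PvScan where
  fa : Option Int
  fe : Option Int
  fo : Option Int
  ou : Bool
  lv : Option Int
  pv : Option Char
deriving DecidableEq, Repr

-- one iteration of B's `for i, ch in enumerate(syllable)` loop
def pvStep (s : PvScan) (p : Int × Char) : PvScan :=
  { fa := if p.2 = 'a' ∧ s.fa = none then some p.1 else s.fa
    fe := if p.2 = 'e' ∧ s.fe = none then some p.1 else s.fe
    fo := if p.2 = 'o' ∧ s.fo = none then some p.1 else s.fo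
    ou := s.ou || (s.pv = some 'o' && p.2 = 'u')
    lv := if p.2 ∈ (['a', 'e', 'i', 'o', 'u', 'v'] : List Char) then some p.1 else s.lv
    pv := some p.2 }

-- the body of B after the neutral-tone early return
def pvBcore (cs0 : List Char) (tone : Int) : List Char :=
  let cs := PySem.Chars.replace cs0 ['u', ':'] ['v']
  let s := (PySem.List.enumerate cs 0).foldl pvStep ⟨none, none, none, false, none, none⟩
  let idx? : Option Int :=
    match s.fa with
    | some i => some i
    | none =>
      match s.fe with
      | some i => some i
      | none => if s.ou then s.fo else s.lv
  match idx? with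
  | none => PySem.Chars.replace cs ['v'] ['ü']
  | some idx =>
    match PySem.List.pyGet? cs idx with
    | none => cs  -- unreachable: the scan only records valid indices
    | some v =>
      match PySem.List.pyGet? (pvToneMarks v) (tone - 1) with
      | some m =>
        PySem.List.slice cs none (some idx) ++ m ++ PySem.List.slice cs (some (idx + 1)) none
      | none => cs  -- Python raises IndexError here (tone 6–9); outside Pre_

def tone_number_to_mark_alt (syllable : String) : String :=
  let cs := PySem.Chars.lower (PySem.Chars.strip syllable.toList)
  if cs = [] then String.ofList cs
  else
    match PySem.List.pyGet? cs (-1) with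
    | none => String.ofList cs  -- unreachable: cs ≠ []
    | some c =>
      if PySem.Chars.strIsdigit [c] then
        let tone := (PySem.Int.ofChars? [c]).getD 0  -- some: [c] is a digit
        let ds := PySem.List.slice cs none (some (-1))
        if tone = 5 ∨ tone = 0 then
          String.ofList (PySem.Chars.replace (PySem.Chars.replace ds ['v'] ['ü']) ['u', ':'] ['ü'])
        else String.ofList (pvBcore ds tone)
      else  -- tone = 5 (neutral)
        String.ofList (PySem.Chars.replace (PySem.Chars.replace cs ['v'] ['ü']) ['u', ':'] ['ü'])

-- ===== PRECONDITION & SPEC =====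
-- Pre_ excludes exactly the inputs on which A raises IndexError: a tone digit 6–9
-- together with a vowel that would receive the (out-of-range) tone mark.
def Pre_tone_number_to_mark (syllable : String) : Prop :=
  (let s := PySem.Chars.lower (PySem.Chars.strip syllable.toList)
   match s.getLast? with
   | some c =>
     if PySem.Chars.isdigit c && decide ('5' < c) then
       s.dropLast.all (fun x => !(['a', 'e', 'i', 'o', 'u', 'v'] : List Char).contains x)
     else true
   | none => true) = true
instance (syllable : String) : Decidable (Pre_tone_number_to_mark syllable) := by
  unfold Pre_tone_number_to_mark; infer_instance

def pvWitness_tone_number_to_mark : String := "ma1"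

def Spec_tone_number_to_mark (syllable : String) (out : String) : Prop := out = tone_number_to_mark_alt syllable
instance (syllable : String) (out : String) : Decidable (Spec_tone_number_to_mark syllable out) := by unfold Spec_tone_number_to_mark; infer_instance

-- ===== CLAIM (what is proved, stated in full; the proofs are below) =====
def Claim_equal_tone_number_to_mark : Prop := ∀ (syllable : String), Dom_tone_number_to_mark syllable → Pre_tone_number_to_mark syllable → Spec_tone_number_to_mark syllable (tone_number_to_mark syllable)

-- ===== LEMMAS AND PROOFS =====

def pvFirstIdx (c : Char) : List Char → Option Nat
  | [] => none
  | x :: xs => if x = c then some 0 else (pvFirstIdx c xs).map (· + 1)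

def pvLastVowel : List Char → Option Nat
  | [] => none
  | x :: xs =>
    match pvLastVowel xs with
    | some j => some (j + 1)
    | none => if x ∈ pvToneKeys then some 0 else none

def pvHasOU : List Char → Bool
  | [] => false
  | [_] => false
  | x :: y :: xs => (x = 'o' && y = 'u') || pvHasOU (y :: xs)

theorem pvFirstIdx_eq_none_iff (c : Char) (cs : List Char) : pvFirstIdx c cs = none ↔ c ∉ cs := by
  induction cs with
  | nil => simp [pvFirstIdx]
  | cons x xs ih =>
    rw [pvFirstIdx]
    by_cases hx : x = c
    · simp [hx]
    · simp only [hx, if_false, Option.map_eq_none_iff, ih, List.mem_cons]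
      constructor
      · rintro h (rfl | hc)
        · exact hx rfl
        · exact h hc
      · intro h hc
        exact h (Or.inr hc)

theorem pvFirstIdx_spec (c : Char) (cs : List Char) (j : Nat) (h : pvFirstIdx c cs = some j) :
    j < cs.length ∧ cs.getD j ' ' = c ∧
      ∀ m, pvReplace1 cs c m = cs.take j ++ m ++ cs.drop (j + 1) := by
  induction cs generalizing j with
  | nil => simp [pvFirstIdx] at h
  | cons x xs ih =>
    by_cases hx : x = c
    · simp [pvFirstIdx, hx] at h
      subst h hx
      simp [pvReplace1]
    · simp [pvFirstIdx, hx] at h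
      obtain ⟨j', hj', rfl⟩ := h
      obtain ⟨h1, h2, h3⟩ := ih j' hj'
      refine ⟨by simp; omega, by simpa using h2, ?_⟩
      intro m
      simp [pvReplace1, hx, h3 m]

theorem pvHasOU_iff (cs : List Char) : pvHasOU cs = true ↔ ['o', 'u'] <:+: cs := by
  induction cs with
  | nil => simp [pvHasOU]
  | cons x xs ih =>
    cases xs with
    | nil =>
      simp only [pvHasOU, Bool.false_eq_true, false_iff]
      intro h
      have := h.length_le
      simp at this
    | cons y ys =>
      rw [List.infix_cons_iff]
      constructor
      · intro h
        rw [pvHasOU] at h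
        rcases Bool.or_eq_true_iff.mp h with h | h
        · left
          simp at h
          simp [h.1, h.2, List.cons_prefix_cons]
        · right; exact ih.mp h
      · intro h
        rcases h with h | h
        · rcases List.cons_prefix_cons.mp h with ⟨rfl, h2⟩
          rcases List.cons_prefix_cons.mp h2 with ⟨rfl, _⟩
          simp [pvHasOU]
        · rw [pvHasOU]
          simp [ih.mpr h]

theorem pvLastVowel_spec (cs : List Char) (j : Nat) (h : pvLastVowel cs = some j) :
    j < cs.length ∧ cs.getD j ' ' ∈ pvToneKeys := by
  induction cs generalizing j with
  | nil => simp [pvLastVowel] at h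
  | cons x xs ih =>
    rw [pvLastVowel] at h
    cases hx : pvLastVowel xs with
    | some j' =>
      rw [hx] at h
      obtain rfl : j' + 1 = j := by simpa using h
      obtain ⟨h1, h2⟩ := ih j' hx
      exact ⟨by simp; omega, by simpa using h2⟩
    | none =>
      rw [hx] at h
      by_cases hk : x ∈ pvToneKeys
      · rw [if_pos hk] at h
        obtain rfl : 0 = j := by simpa using h
        simpa using hk
      · rw [if_neg hk] at h
        simp at h

theorem pvLastVowel_append (xs : List Char) (x : Char) :
    pvLastVowel (xs ++ [x]) =
      if x ∈ pvToneKeys then some xs.length else pvLastVowel xs := by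
  induction xs with
  | nil =>
    simp only [List.nil_append, pvLastVowel]
    split <;> simp
  | cons y ys ih =>
    rw [List.cons_append, pvLastVowel, ih, pvLastVowel]
    by_cases hx : x ∈ pvToneKeys <;> cases h : pvLastVowel ys <;>
      simp [hx, h, List.length_cons]

theorem pvDownScan_take (cs : List Char) : ∀ n, n ≤ cs.length →
    pvDownScan cs n = pvLastVowel (cs.take n) := by
  intro n
  induction n with
  | zero => intro _; simp [pvDownScan, pvLastVowel]
  | succ i ih =>
    intro h
    have hi : i < cs.length := by omega
    rw [pvDownScan, List.take_succ, ih (by omega)]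
    have hg : cs[i]?.toList = [cs.getD i ' '] := by
      simp [List.getElem?_eq_getElem hi, List.getD_eq_getElem?_getD, List.getElem?_eq_getElem hi]
    rw [hg, pvLastVowel_append]
    split <;> simp [List.length_take] <;> omega

theorem pvDownScan_eq (cs : List Char) : pvDownScan cs cs.length = pvLastVowel cs := by
  rw [pvDownScan_take cs cs.length le_rfl, List.take_length]

theorem pvIsIn_singleton (c : Char) (cs : List Char) :
    PySem.Chars.isIn [c] cs = true ↔ c ∈ cs := by
  rw [PySem.Chars.isIn_iff_infix, List.singleton_infix_iff]

theorem pv_scan_spec (cs : List Char) : ∀ (k : Int) (s : PvScan),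
    (PySem.List.enumerate cs k).foldl pvStep s =
      { fa := (s.fa.or ((pvFirstIdx 'a' cs).map (fun j => k + j)))
        fe := (s.fe.or ((pvFirstIdx 'e' cs).map (fun j => k + j)))
        fo := (s.fo.or ((pvFirstIdx 'o' cs).map (fun j => k + j)))
        ou := s.ou || (decide (s.pv = some 'o') && decide (cs.head? = some 'u')) || pvHasOU cs
        lv := ((pvLastVowel cs).map (fun j => k + j)).or s.lv
        pv := (cs.getLast?).or s.pv } := by
  induction cs with
  | nil =>
    intro k s
    simp [PySem.List.enumerate_nil, pvFirstIdx, pvLastVowel, pvHasOU]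
  | cons x xs ih =>
    intro k s
    rw [PySem.List.enumerate_cons, List.foldl_cons, ih]
    refine PvScan.mk.injEq .. ▸ ?_
    refine ⟨?_, ?_, ?_, ?_, ?_, ?_⟩ <;> simp only [pvStep, pvFirstIdx, pvLastVowel]
    · by_cases hx : x = 'a' <;> cases hfa : s.fa <;>
        simp [hx, hfa] <;> cases pvFirstIdx 'a' xs <;> simp <;> omega
    · by_cases hx : x = 'e' <;> cases hfe : s.fe <;>
        simp [hx, hfe] <;> cases pvFirstIdx 'e' xs <;> simp <;> omega
    · by_cases hx : x = 'o' <;> cases hfo : s.fo <;>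
        simp [hx, hfo] <;> cases pvFirstIdx 'o' xs <;> simp <;> omega
    · cases xs with
      | nil => simp [pvHasOU]
      | cons y ys =>
        cases s.ou <;> cases hp : s.pv <;> by_cases hx : x = 'o' <;> by_cases hy : y = 'u' <;>
          simp [pvHasOU, hx, hy, hp] <;> tauto
    · cases hlv : pvLastVowel xs with
      | some j => simp [hlv] ; omega
      | none =>
        by_cases hx : pvToneKeys.contains x <;>
          simp [hlv, hx, pvToneKeys] at * <;> simp [hx, hlv]
    · cases xs with
      | nil => simp
      | cons y ys =>
        cases h : (y :: ys).getLast? with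
        | none => simp [List.getLast?_eq_none_iff] at h
        | some c => simp [h]

theorem pv_getD_eq (cs : List Char) (j : Nat) (hj : j < cs.length) : cs.getD j ' ' = cs[j] := by
  simp [List.getD_eq_getElem?_getD, List.getElem?_eq_getElem hj]

-- the common splice: B's index-based branch equals the take/++/drop form
theorem pv_branchB (cs : List Char) (tone : Int) (j : Nat) (hj : j < cs.length) :
    (match PySem.List.pyGet? cs ((j : Int)) with
     | none => cs
     | some v =>
       match PySem.List.pyGet? (pvToneMarks v) (tone - 1) with
       | some m =>
         PySem.List.slice cs none (some (j : Int)) ++ m ++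
           PySem.List.slice cs (some ((j : Int) + 1)) none
       | none => cs) =
    (match PySem.List.pyGet? (pvToneMarks (cs.getD j ' ')) (tone - 1) with
     | some m => cs.take j ++ m ++ cs.drop (j + 1)
     | none => cs) := by
  rw [PySem.List.pyGet?_natCast, List.getElem?_eq_getElem hj, pv_getD_eq cs j hj,
    PySem.List.slice_to_natCast, show ((j : Int) + 1) = ((j + 1 : Nat) : Int) by push_cast; ring,
    PySem.List.slice_from_natCast]

theorem pv_core_eq (cs0 : List Char) (tone : Int) : pvAcore cs0 tone = pvBcore cs0 tone := by
  unfold pvAcore pvBcore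
  simp only
  generalize PySem.Chars.replace cs0 ['u', ':'] ['v'] = cs
  rw [pv_scan_spec cs 0 ⟨none, none, none, false, none, none⟩]
  simp only [Option.none_or, Option.or_none, Bool.false_or,
    reduceCtorEq, decide_false, Bool.false_and, Bool.and_false]
  cases ha : pvFirstIdx 'a' cs with
  | some j =>
    obtain ⟨hj, hc, hrep⟩ := pvFirstIdx_spec 'a' cs j ha
    have hmem : 'a' ∈ cs := by
      by_contra hm
      rw [(pvFirstIdx_eq_none_iff 'a' cs).mpr hm] at ha
      simp at ha
    rw [if_pos ((pvIsIn_singleton 'a' cs).mpr hmem)]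
    simp only [Option.bind_eq_bind, Option.pure_def, Option.bind_some, Option.map_some, zero_add, Bool.false_eq_true, Bool.true_eq_false, if_true, if_false]
    rw [pv_branchB cs tone j hj, hc]
    simp only [hrep]
  | none =>
    have hna : 'a' ∉ cs := (pvFirstIdx_eq_none_iff 'a' cs).mp ha
    rw [if_neg (by simp [pvIsIn_singleton, hna])]
    simp only [Option.bind_eq_bind, Option.pure_def, Option.bind_none, Option.map_none]
    cases he : pvFirstIdx 'e' cs with
    | some j =>
      obtain ⟨hj, hc, hrep⟩ := pvFirstIdx_spec 'e' cs j he
      have hmem : 'e' ∈ cs := by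
        by_contra hm
        rw [(pvFirstIdx_eq_none_iff 'e' cs).mpr hm] at he
        simp at he
      rw [if_pos ((pvIsIn_singleton 'e' cs).mpr hmem)]
      simp only [Option.bind_eq_bind, Option.pure_def, Option.bind_some, Option.map_some, zero_add, Bool.false_eq_true, Bool.true_eq_false, if_true, if_false]
      rw [pv_branchB cs tone j hj, hc]
      simp only [hrep]
    | none =>
      have hne : 'e' ∉ cs := (pvFirstIdx_eq_none_iff 'e' cs).mp he
      rw [if_neg (by simp [pvIsIn_singleton, hne])]
      simp only [Option.bind_eq_bind, Option.pure_def, Option.bind_none, Option.map_none]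
      have hou : PySem.Chars.isIn ['o', 'u'] cs = pvHasOU cs := by
        rw [Bool.eq_iff_iff, PySem.Chars.isIn_iff_infix, pvHasOU_iff]
      rw [hou]
      cases hou2 : pvHasOU cs with
      | true =>
        rw [if_pos rfl]
        have hinf : ['o', 'u'] <:+: cs := (pvHasOU_iff cs).mp hou2
        have hmem : 'o' ∈ cs := hinf.sublist.subset (by simp)
        cases ho : pvFirstIdx 'o' cs with
        | none => exact absurd ((pvFirstIdx_eq_none_iff 'o' cs).mp ho) (by simpa using hmem)
        | some j =>
          obtain ⟨hj, hc, hrep⟩ := pvFirstIdx_spec 'o' cs j ho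
          simp only [Option.bind_eq_bind, Option.pure_def, Option.bind_some, Option.map_some, zero_add, Bool.false_eq_true, Bool.true_eq_false, if_true, if_false]
          rw [pv_branchB cs tone j hj, hc]
          simp only [hrep]
      | false =>
        rw [if_neg (by simp)]
        rw [pvDownScan_eq]
        cases hlv : pvLastVowel cs with
        | none => simp
        | some j =>
          obtain ⟨hj, -⟩ := pvLastVowel_spec cs j hlv
          simp only [Option.bind_eq_bind, Option.pure_def, Option.bind_some, Option.map_some, zero_add, Bool.false_eq_true, Bool.true_eq_false, if_true, if_false]
          rw [pv_branchB cs tone j hj,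
            PySem.List.slice_to_natCast, show ((j : Int) + 1) = ((j + 1 : Nat) : Int) by push_cast; ring,
            PySem.List.slice_from_natCast]

-- ===== VERDICT (by name: the statement is the Claim_ definition above) =====
theorem tone_number_to_mark_spec : Claim_equal_tone_number_to_mark := by
  intro syllable _ _
  unfold Spec_tone_number_to_mark tone_number_to_mark tone_number_to_mark_alt
  simp only
  split
  · rfl
  · split
    · rfl
    · split
      · split
        · rfl
        · exact congrArg String.ofList (pv_core_eq _ _)
      · rfl
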